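-- pv_equiv track=rewrite | github.com/burningion/game-onboarding-oai | run_game_agent.py | parse_document_sections
-- ===== SOURCE A (Python) =====
-- from typing import List, Dict, Any
--
-- def parse_document_sections(content: str) -> Dict[str, str]:
--     """Parse document into sections for scene generation"""
--     sections = {}
--
--     # Simple section parsing - can be enhanced
--     lines = content.split('\n')
--     current_section = "Introduction"
--     current_content = []
--
--     for line in lines:
--         # Detect section headers (lines that are all caps or numbered)
--         if line.strip() and (line.isupper() or line.strip()[0].isdigit()):
--             if current_content:
--                 sections[current_section] = '\n'.join(current_content)
--             current_section = line.strip()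
--             current_content = []
--         else:
--             current_content.append(line)
--
--     # Add last section
--     if current_content:
--         sections[current_section] = '\n'.join(current_content)
--
--     # If no sections found, treat as single section
--     if len(sections) <= 1:
--         sections = {
--             "Welcome & Introduction": content[:1000],
--             "Core Information": content[1000:2000],
--             "Policies & Procedures": content[2000:3000],
--             "Resources & Support": content[3000:]
--         }
--
--     return sections
-- ===== SOURCE B (Python) =====
-- def parse_document_sections(content: str) -> dict:
--     """Parse document into sections for scene generation"""
--     lines = content.split('\n')
--     pairs = _segments("Introduction", lines)
--     sections = {}
--     for name, text in pairs:
--         sections[name] = text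
--     # If no sections found, treat as single section
--     if len(sections) <= 1:
--         sections = {
--             "Welcome & Introduction": content[:1000],
--             "Core Information": content[1000:2000],
--             "Policies & Procedures": content[2000:3000],
--             "Resources & Support": content[3000:]
--         }
--     return sections
--
--
-- def _is_header(line):
--     s = line.strip()
--     return bool(s) and (line.isupper() or s[0].isdigit())
--
--
-- def _segments(name, lines):
--     """Cut `lines` at header lines; label each non-empty segment of body lines."""
--     pairs = []
--     i = 0
--     n = len(lines)
--     while True:
--         k = i
--         while k < n and not _is_header(lines[k]):
--             k += 1
--         if k > i:
--             pairs.append((name, '\n'.join(lines[i:k])))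
--         if k == n:
--             return pairs
--         name = lines[k].strip()
--         i = k + 1
-- ===== Notes on version B (the rewrite author's own statement) =====
-- stated objective: alternative
-- what changed: Instead of A's single fold that carries a dict plus a mutable line buffer and flushes inside the loop, B first cuts the line list into labeled segments at header boundaries (inner scan + slice, producing a pair list) and only then builds the dict from those pairs.
import Mathlib
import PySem

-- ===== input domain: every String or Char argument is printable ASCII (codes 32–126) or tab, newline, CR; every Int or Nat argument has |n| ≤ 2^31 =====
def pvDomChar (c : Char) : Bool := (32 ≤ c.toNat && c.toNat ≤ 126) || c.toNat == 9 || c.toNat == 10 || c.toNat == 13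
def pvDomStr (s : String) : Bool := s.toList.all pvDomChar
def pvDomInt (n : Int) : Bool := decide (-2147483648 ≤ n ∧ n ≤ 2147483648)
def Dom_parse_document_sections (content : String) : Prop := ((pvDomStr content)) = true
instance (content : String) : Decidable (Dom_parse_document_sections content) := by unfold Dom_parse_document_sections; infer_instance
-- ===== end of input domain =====

-- B restructures A: A folds over the lines carrying a dict and a line buffer, flushing inside the
-- loop; B cuts the line list into labeled segments at header boundaries first (pair list), then
-- builds the dict from the pairs. Objective: alternative decomposition, same cost.

-- ===== PORT A =====
-- Python str.isupper(): some cased char and no lowercase cased char; exact on the ASCII domain,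
-- where the cased characters are exactly the letters.
def pvIsupper (s : String) : Bool :=
  s.toList.any PySem.Chars.isalpha && s.toList.all (fun c => !(PySem.Chars.islower c))

-- `line.strip() and (line.isupper() or line.strip()[0].isdigit())`
def pvHeader (line : String) : Bool :=
  let s := PySem.Str.strip line
  !s.toList.isEmpty &&
    (pvIsupper line ||
      (match s.toList with
       | c :: _ => PySem.Chars.isdigit c
       | [] => false))

-- A's for-loop over lines, state = (sections dict, current_section, current_content)
def pvLoopA (d : PySem.Dict String String) (sec : String) (buf : List String) :
    List String → PySem.Dict String String
  | [] => if buf.isEmpty then d else d.insert sec (PySem.Str.join "\n" buf)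
  | l :: ls =>
    if pvHeader l then
      pvLoopA (if buf.isEmpty then d else d.insert sec (PySem.Str.join "\n" buf))
        (PySem.Str.strip l) [] ls
    else
      pvLoopA d sec (buf ++ [l]) ls

def parse_document_sections (content : String) : List (String × String) :=
  let lines := (PySem.Chars.splitOn content.toList "\n".toList).map String.ofList
  let sections := pvLoopA PySem.Dict.empty "Introduction" [] lines
  if sections.size ≤ 1 then
    -- dict literal with four distinct keys: its items are exactly this list
    [("Welcome & Introduction", PySem.Str.slice content none (some 1000)),
     ("Core Information", PySem.Str.slice content (some 1000) (some 2000)),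
     ("Policies & Procedures", PySem.Str.slice content (some 2000) (some 3000)),
     ("Resources & Support", PySem.Str.slice content (some 3000) none)]
  else sections.items

-- ===== PORT B =====
-- Source B's _segments loop: each iteration scans to the next header (the inner `while k < n`
-- scan = takeWhile / dropWhile), slices off one labeled segment, and continues after the header;
-- the outer `while True` over the remaining suffix is this tail recursion with accumulator.
def pvSegs (name : String) (lines : List String) (acc : List (String × String)) :
    List (String × String) :=
  let body := lines.takeWhile (fun l => !pvHeader l)       -- lines[i:k]
  let acc' := if body.isEmpty then acc else acc ++ [(name, PySem.Str.join "\n" body)]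
  match hrest : lines.dropWhile (fun l => !pvHeader l) with
  | [] => acc'                                             -- k == n: return pairs
  | hd :: t => pvSegs (PySem.Str.strip hd) t acc'
termination_by lines.length
decreasing_by
  have h := List.length_dropWhile_le (fun l => !pvHeader l) lines
  rw [hrest] at h
  simp at h
  omega

def parse_document_sections_alt (content : String) : List (String × String) :=
  let lines := (PySem.Chars.splitOn content.toList "\n".toList).map String.ofList
  let pairs := pvSegs "Introduction" lines []
  let sections := pairs.foldl (fun d kv => d.insert kv.1 kv.2) PySem.Dict.empty
  if sections.size ≤ 1 then
    -- dict literal with four distinct keys: its items are exactly this list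
    [("Welcome & Introduction", PySem.Str.slice content none (some 1000)),
     ("Core Information", PySem.Str.slice content (some 1000) (some 2000)),
     ("Policies & Procedures", PySem.Str.slice content (some 2000) (some 3000)),
     ("Resources & Support", PySem.Str.slice content (some 3000) none)]
  else sections.items

-- ===== PRECONDITION & SPEC =====
def Spec_parse_document_sections (content : String) (out : List (String × String)) : Prop := out = parse_document_sections_alt content
instance (content : String) (out : List (String × String)) : Decidable (Spec_parse_document_sections content out) := by unfold Spec_parse_document_sections; infer_instance

-- ===== CLAIM (what is proved, stated in full; the proofs are below) =====
def Claim_equal_parse_document_sections : Prop := ∀ (content : String), Dom_parse_document_sections content → Spec_parse_document_sections content (parse_document_sections content)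

-- ===== LEMMAS AND PROOFS =====

-- the segment list pvSegs produces, spelled out one step, with an extra buffer prefix for the
-- first segment (matching A's carried current_content)
def pvSegsBuf (sec : String) (buf : List String) (lines : List String) :
    List (String × String) :=
  let body := buf ++ lines.takeWhile (fun l => !pvHeader l)
  (if body.isEmpty then [] else [(sec, PySem.Str.join "\n" body)]) ++
    (match lines.dropWhile (fun l => !pvHeader l) with
     | [] => []
     | hd :: t => pvSegs (PySem.Str.strip hd) t [])

lemma pvSegs_acc (N : Nat) : ∀ (lines : List String), lines.length ≤ N →
    ∀ (name : String) (acc : List (String × String)),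
      pvSegs name lines acc = acc ++ pvSegs name lines [] := by
  induction N with
  | zero =>
    intro lines h name acc
    have : lines = [] := List.eq_nil_of_length_eq_zero (Nat.le_zero.mp h)
    subst this
    rw [pvSegs, pvSegs]
    simp
  | succ N ih =>
    intro lines h name acc
    rw [pvSegs, pvSegs]
    cases hrest : lines.dropWhile (fun l => !pvHeader l) with
    | nil => simp; split <;> simp
    | cons hd t =>
      have hlen := List.length_dropWhile_le (fun l => !pvHeader l) lines
      rw [hrest] at hlen
      simp at hlen
      have ht : t.length ≤ N := by omega
      simp only
      rw [ih t ht, ih t ht (acc := if (lines.takeWhile (fun l => !pvHeader l)).isEmpty then []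
        else [] ++ [(name, PySem.Str.join "\n" (lines.takeWhile (fun l => !pvHeader l)))])]
      split <;> simp

lemma pvSegs_eq_buf (name : String) (lines : List String) :
    pvSegs name lines [] = pvSegsBuf name [] lines := by
  rw [pvSegs, pvSegsBuf]
  cases hrest : lines.dropWhile (fun l => !pvHeader l) with
  | nil => simp
  | cons hd t =>
    simp only
    rw [pvSegs_acc t.length t le_rfl]
    by_cases hb : (lines.takeWhile (fun l => !pvHeader l)).isEmpty <;> simp [hb]

lemma pvLoopA_eq (lines : List String) : ∀ (d : PySem.Dict String String) (sec : String)
    (buf : List String),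
    pvLoopA d sec buf lines =
      (pvSegsBuf sec buf lines).foldl (fun d kv => d.insert kv.1 kv.2) d := by
  induction lines with
  | nil =>
    intro d sec buf
    rw [pvLoopA, pvSegsBuf]
    simp only [List.takeWhile_nil, List.dropWhile_nil, List.append_nil]
    split <;> simp
  | cons l ls ih =>
    intro d sec buf
    by_cases h : pvHeader l
    · rw [pvLoopA, pvSegsBuf]
      simp only [h, if_true, List.takeWhile_cons, List.dropWhile_cons, Bool.not_true,
        Bool.false_eq_true, if_false, List.append_nil]
      rw [ih, pvSegs_eq_buf]
      rw [List.foldl_append]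
      congr 1
      split <;> simp
    · rw [pvLoopA, pvSegsBuf]
      simp only [h, List.takeWhile_cons, List.dropWhile_cons, Bool.not_false,
        ite_true]
      rw [ih d sec (buf ++ [l]), pvSegsBuf]
      simp

-- ===== VERDICT (by name: the statement is the Claim_ definition above) =====
theorem parse_document_sections_spec : Claim_equal_parse_document_sections := by
  intro content _
  unfold Spec_parse_document_sections parse_document_sections parse_document_sections_alt
  simp only
  rw [pvLoopA_eq, ← pvSegs_eq_buf]
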